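-- pv_equiv track=rewrite | github.com/kma94dz/combinatory-logic-with-GUI | LC.py | refineBraq
-- ===== SOURCE A (Python) =====
-- def refineBraq(P,v):
--  N=[]
--  NP=[]
--  C=[]
--  P3=[]
--  if v==1:
--   for i in range(len(P[2])):
--    if P[2][i]=="(":
--     count=0
--     for j in range(i,len(P[2])):
--      if P[2][j]=="(":
--       count=count+1
--      if P[2][j]==")":
--       count=count-1
--      if count==0:
--       N.append(P[0][i])
--       NP.append(P[1][i])
--       C.append(P[2][i])
--       break
--    else:
--     N.append(P[0][i])
--     NP.append(P[1][i])
--     C.append(P[2][i])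
--   P3.append(N)
--   P3.append(NP)
--   P3.append(C)
--   return P3
--  if v==2:
--   for i in range(len(P[2])):
--    if P[2][i]==")":
--     count=0
--     for j in range(i,len(P[2])):
--      if P[2][j]==")":
--       count=count+1
--      if P[2][j]=="(":
--       count=count-1
--      if count==0:
--       #P3.append(P[i])
--       N.append(P[0][i])
--       NP.append(P[1][i])
--       C.append(P[2][i])
--       break
--    else:
--     #P3.append(P[i])
--     N.append(P[0][i])
--     NP.append(P[1][i])
--     C.append(P[2][i])
--   P3.append(N)
--   P3.append(NP)
--   P3.append(C)
--   return P3
-- ===== SOURCE B (Python) =====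
-- def refineBraq(P, v):
--     # Single backward pass: keep a paren of the scanned kind iff the running
--     # balance of the suffix after it ever drops below 0 (= A's inner rescan hit 0).
--     if v == 1:
--         target, other = "(", ")"
--     elif v == 2:
--         target, other = ")", "("
--     else:
--         return None
--     C = P[2]
--     n = len(C)
--     keep = [False] * n
--     m = 0  # minimum over the non-empty prefix sums of the suffix already processed
--     for i in range(n - 1, -1, -1):
--         c = C[i]
--         keep[i] = (c != target) or (m <= -1)
--         step = 1 if c == target else (-1 if c == other else 0)
--         m = min(step, step + m)
--     N = [P[0][i] for i, k in enumerate(keep) if k]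
--     NP = [P[1][i] for i, k in enumerate(keep) if k]
--     Cc = [c for c, k in zip(C, keep) if k]
--     return [N, NP, Cc]
-- ===== Notes on version B (the rewrite author's own statement) =====
-- stated objective: alternative
-- what changed: A rescans the whole suffix from every parenthesis to decide matchedness (nested loops); B does one backward pass maintaining the minimum suffix prefix-sum, deciding each position in O(1), then gathers the kept columns.
-- outside the precondition, e.g. on refineBraq([[], [], ['(']], 1): A returns [[], [], []], B returns [[], [], []]
import Mathlib
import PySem

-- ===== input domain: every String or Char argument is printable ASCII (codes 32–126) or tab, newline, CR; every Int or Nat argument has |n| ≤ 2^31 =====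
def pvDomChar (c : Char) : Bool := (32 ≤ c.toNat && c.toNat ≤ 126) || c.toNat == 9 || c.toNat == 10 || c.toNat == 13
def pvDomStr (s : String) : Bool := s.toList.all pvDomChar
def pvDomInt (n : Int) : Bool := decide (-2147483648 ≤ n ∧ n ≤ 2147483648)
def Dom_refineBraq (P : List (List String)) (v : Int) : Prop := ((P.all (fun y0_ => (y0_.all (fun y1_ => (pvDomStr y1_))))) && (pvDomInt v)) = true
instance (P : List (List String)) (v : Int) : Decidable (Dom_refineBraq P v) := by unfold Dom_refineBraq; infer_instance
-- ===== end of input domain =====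

-- B replaces A's rescan-per-parenthesis (nested loops) with one backward pass over row 2
-- keeping the minimum suffix prefix-sum (objective: alternative; not measured faster).
-- A's two v-branches are char-identical up to swapping "(" and ")"; both ports take the
-- pair (t, o) as parameters and the branches instantiate it.

-- ===== PORT A =====
-- Python: count = count+1 if c==t; count = count-1 if c==o  (two independent ifs, in order)
def stepA (t o c : String) (count : Int) : Int :=
  let count := if c = t then count + 1 else count
  if c = o then count - 1 else count

-- Python: inner 'for j in range(i, len(P[2]))' with 'if count==0: break' → Bool: matched?
def innerA (t o : String) : List String → Int → Bool
  | [], _ => false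
  | c :: rest, count =>
    let count := stepA t o c count
    if count = 0 then true else innerA t o rest count

-- Python: outer 'for i in range(len(P[2]))'; cs is the suffix P[2][i:], i the running index.
-- N.append(P[0][i]); NP.append(P[1][i]) raise IndexError on short rows → none.
def loopA (t o : String) (P0 P1 : List String) :
    List String → Nat → List String → List String → List String → Option (List (List String))
  | [], _, N, NP, C => some [N, NP, C]
  | c :: rest, i, N, NP, C =>
    if c = t then
      if innerA t o (c :: rest) 0 then
        match PySem.List.pyGet? P0 (i : Int), PySem.List.pyGet? P1 (i : Int) with
        | some a, some b => loopA t o P0 P1 rest (i + 1) (N ++ [a]) (NP ++ [b]) (C ++ [c])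
        | _, _ => none
      else loopA t o P0 P1 rest (i + 1) N NP C
    else
      match PySem.List.pyGet? P0 (i : Int), PySem.List.pyGet? P1 (i : Int) with
      | some a, some b => loopA t o P0 P1 rest (i + 1) (N ++ [a]) (NP ++ [b]) (C ++ [c])
      | _, _ => none

-- P[2] in range forces P.length ≥ 3, so P[0]/P[1] are exactly P.getD 0 [] / P.getD 1 [].
def refineBraq (P : List (List String)) (v : Int) : Option (List (List String)) :=
  if v = 1 then
    match PySem.List.pyGet? P 2 with
    | none => none
    | some P2 => loopA "(" ")" (P.getD 0 []) (P.getD 1 []) P2 0 [] [] []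
  else if v = 2 then
    match PySem.List.pyGet? P 2 with
    | none => none
    | some P2 => loopA ")" "(" (P.getD 0 []) (P.getD 1 []) P2 0 [] [] []
  else none

-- ===== PORT B =====
-- Python: step = 1 if c == target else (-1 if c == other else 0)
def stepB (t o c : String) : Int := if c = t then 1 else if c = o then -1 else 0

-- Python's backward loop over C computing (m, keep), as structural recursion on the list
-- (the loop state at index i depends only on the suffix C[i:], which this recursion computes).
def markB (t o : String) : List String → Int × List Bool
  | [] => (0, [])
  | c :: rest =>
    let r := markB t o rest
    (min (stepB t o c) (stepB t o c + r.1),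
     (decide (c ≠ t) || decide (r.1 ≤ -1)) :: r.2)

-- Python: [row[i] for i, k in enumerate(keep) if k]  (row[i] may raise IndexError → none)
def gatherB (row : List String) : List Bool → Nat → Option (List String)
  | [], _ => some []
  | k :: ks, i =>
    if k then
      match PySem.List.pyGet? row (i : Int), gatherB row ks (i + 1) with
      | some a, some rest => some (a :: rest)
      | _, _ => none
    else gatherB row ks (i + 1)

-- Python: [c for c, k in zip(C, keep) if k]
def takeB : List String → List Bool → List String
  | c :: cs, k :: ks => if k then c :: takeB cs ks else takeB cs ks
  | _, _ => []

def refineBraq_alt (P : List (List String)) (v : Int) : Option (List (List String)) :=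
  if v = 1 ∨ v = 2 then
    let t := if v = 1 then "(" else ")"
    let o := if v = 1 then ")" else "("
    match PySem.List.pyGet? P 2 with
    | none => none
    | some C =>
      let ks := (markB t o C).2
      match gatherB (P.getD 0 []) ks 0, gatherB (P.getD 1 []) ks 0 with
      | some N, some NP => some [N, NP, takeB C ks]
      | _, _ => none
  else none

-- ===== PRECONDITION & SPEC =====
-- Pre_ excludes the inputs where A raises IndexError: for v ∈ {1,2} A reads P[2] and, at every
-- kept position i, P[0][i] and P[1][i]. The closed-form bound requires rows 0 and 1 to be at
-- least as long as row 2; this also excludes degenerate inputs on which A happens to return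
-- because every out-of-range position is a dropped (unmatched) parenthesis.
def Pre_refineBraq (P : List (List String)) (v : Int) : Prop :=
  (v = 1 ∨ v = 2) →
    3 ≤ P.length ∧ (P.getD 2 []).length ≤ (P.getD 0 []).length ∧
      (P.getD 2 []).length ≤ (P.getD 1 []).length
instance (P : List (List String)) (v : Int) : Decidable (Pre_refineBraq P v) := by
  unfold Pre_refineBraq; infer_instance

def pvWitness_refineBraq : List (List String) × Int := ([["a", "b"], ["x", "y"], ["(", ")"]], 1)

def Spec_refineBraq (P : List (List String)) (v : Int) (out : Option (List (List String))) : Prop := out = refineBraq_alt P v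
instance (P : List (List String)) (v : Int) (out : Option (List (List String))) : Decidable (Spec_refineBraq P v out) := by unfold Spec_refineBraq; infer_instance

-- ===== CLAIM (what is proved, stated in full; the proofs are below) =====
def Claim_equal_refineBraq : Prop := ∀ (P : List (List String)) (v : Int), Dom_refineBraq P v → Pre_refineBraq P v → Spec_refineBraq P v (refineBraq P v)

-- ===== LEMMAS AND PROOFS =====

lemma stepA_eq (t o c : String) (h : t ≠ o) (count : Int) :
    stepA t o c count = count + stepB t o c := by
  by_cases h1 : c = t <;> by_cases h2 : c = o <;> simp_all [stepA, stepB]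
  omega

lemma stepB_bounds (t o c : String) : -1 ≤ stepB t o c ∧ stepB t o c ≤ 1 := by
  unfold stepB; split_ifs <;> omega

-- discrete intermediate-value fact: A's inner rescan hits 0 iff the minimum prefix sum
-- (B's m) goes at least as low as -count
lemma innerA_iff (t o : String) (h : t ≠ o) :
    ∀ (cs : List String) (count : Int), 1 ≤ count →
      (innerA t o cs count = true ↔ (markB t o cs).1 ≤ -count) := by
  intro cs
  induction cs with
  | nil => intro count hc; simp [innerA, markB]; omega
  | cons c rest ih =>
    intro count hc
    have hs := stepB_bounds t o c
    rw [innerA, stepA_eq t o c h]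
    by_cases hz : count + stepB t o c = 0
    · simp [hz, markB]
      omega
    · have h1 : 1 ≤ count + stepB t o c := by omega
      simp only [hz, if_false, markB]
      rw [ih _ h1]
      omega

-- the main loop invariant: A's outer loop equals B's gather over B's marks
lemma loop_eq_gather (t o : String) (h : t ≠ o) (P0 P1 : List String) :
    ∀ (cs : List String) (i : Nat) (N NP Ca : List String),
      i + cs.length ≤ P0.length → i + cs.length ≤ P1.length →
      ∃ n0 n1,
        gatherB P0 (markB t o cs).2 i = some n0 ∧
        gatherB P1 (markB t o cs).2 i = some n1 ∧
        loopA t o P0 P1 cs i N NP Ca = some [N ++ n0, NP ++ n1, Ca ++ takeB cs (markB t o cs).2] := by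
  intro cs
  induction cs with
  | nil => intro i N NP Ca _ _; exact ⟨[], [], by simp [markB, gatherB], by simp [markB, gatherB],
      by simp [loopA, takeB]⟩
  | cons c rest ih =>
    intro i N NP Ca h0 h1
    simp only [List.length_cons] at h0 h1
    have hi0 : i < P0.length := by omega
    have hi1 : i < P1.length := by omega
    have hg0 : PySem.List.pyGet? P0 (i : Int) = some P0[i] := by
      rw [PySem.List.pyGet?_natCast]; exact List.getElem?_eq_getElem hi0
    have hg1 : PySem.List.pyGet? P1 (i : Int) = some P1[i] := by
      rw [PySem.List.pyGet?_natCast]; exact List.getElem?_eq_getElem hi1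
    obtain ⟨n0, n1, hh0, hh1, hloop⟩ := ih (i + 1) (N ++ [P0[i]]) (NP ++ [P1[i]]) (Ca ++ [c])
      (by omega) (by omega)
    obtain ⟨m0, m1, hm0, hm1, hmloop⟩ := ih (i + 1) N NP Ca (by omega) (by omega)
    by_cases hc : c = t
    · -- a parenthesis of the scanned kind: kept iff matched
      have hinner : innerA t o (c :: rest) 0 =
          decide ((markB t o rest).1 ≤ -1) := by
        have hstep : stepB t o c = 1 := by simp [stepB, hc]
        rw [innerA, stepA_eq t o c h, hstep]
        have h01 : (0 : Int) + 1 = 1 := by norm_num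
        rw [h01, if_neg (by norm_num : (1 : Int) ≠ 0)]
        by_cases hm : (markB t o rest).1 ≤ -1
        · simp [hm, (innerA_iff t o h rest 1 (by omega)).2 (by omega)]
        · simp only [hm, decide_false]
          by_contra hcon
          simp only [Bool.not_eq_false] at hcon
          have := (innerA_iff t o h rest 1 (by omega)).1 hcon
          omega
      by_cases hm : (markB t o rest).1 ≤ -1
      · refine ⟨P0[i] :: n0, P1[i] :: n1, ?_, ?_, ?_⟩
        · simp [markB, gatherB, hc, hm, hg0, hh0]
        · simp [markB, gatherB, hc, hm, hg1, hh1]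
        · rw [loopA, if_pos hc, hinner]
          simp only [hm, decide_true, hg0, hg1]
          rw [hloop]
          simp [markB, takeB, hc, hm, List.append_assoc]
      · refine ⟨m0, m1, ?_, ?_, ?_⟩
        · simp [markB, gatherB, hc, hm, hm0]
        · simp [markB, gatherB, hc, hm, hm1]
        · rw [loopA, if_pos hc, hinner]
          simp only [hm, decide_false, Bool.false_eq_true, if_false]
          rw [hmloop]
          simp [markB, takeB, hc, hm]
    · -- not the scanned symbol: always kept
      refine ⟨P0[i] :: n0, P1[i] :: n1, ?_, ?_, ?_⟩
      · simp [markB, gatherB, hc, hg0, hh0]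
      · simp [markB, gatherB, hc, hg1, hh1]
      · rw [loopA, if_neg hc]
        simp only [hg0, hg1]
        rw [hloop]
        simp [markB, takeB, hc, List.append_assoc]

lemma paren_ne : ("(" : String) ≠ ")" := by decide
lemma paren_ne' : (")" : String) ≠ "(" := by decide

-- ===== VERDICT (by name: the statement is the Claim_ definition above) =====
theorem refineBraq_spec : Claim_equal_refineBraq := by
  intro P v _ hpre
  unfold Spec_refineBraq
  by_cases hv1 : v = 1
  · obtain ⟨hlen, hl0, hl1⟩ := hpre (Or.inl hv1)
    have h2 : 2 < P.length := by omega
    have hP2 : PySem.List.pyGet? P 2 = some (P.getD 2 []) := by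
      rw [show ((2 : Int)) = ((2 : Nat) : Int) by norm_num, PySem.List.pyGet?_natCast]
      simp [List.getD, List.getElem?_eq_getElem h2]
    obtain ⟨n0, n1, hg0, hg1, hloop⟩ :=
      loop_eq_gather "(" ")" paren_ne (P.getD 0 []) (P.getD 1 []) (P.getD 2 []) 0 [] [] []
        (by omega) (by omega)
    simp only [List.getD] at hP2 hg0 hg1 hloop
    rw [refineBraq, refineBraq_alt]
    simp [hv1, hP2, hg0, hg1, hloop]
  · by_cases hv2 : v = 2
    · obtain ⟨hlen, hl0, hl1⟩ := hpre (Or.inr hv2)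
      have h2 : 2 < P.length := by omega
      have hP2 : PySem.List.pyGet? P 2 = some (P.getD 2 []) := by
        rw [show ((2 : Int)) = ((2 : Nat) : Int) by norm_num, PySem.List.pyGet?_natCast]
        simp [List.getD, List.getElem?_eq_getElem h2]
      obtain ⟨n0, n1, hg0, hg1, hloop⟩ :=
        loop_eq_gather ")" "(" paren_ne' (P.getD 0 []) (P.getD 1 []) (P.getD 2 []) 0 [] [] []
          (by omega) (by omega)
      simp only [List.getD] at hP2 hg0 hg1 hloop
      rw [refineBraq, refineBraq_alt]
      simp [hv2, hP2, hg0, hg1, hloop]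
    · rw [refineBraq, refineBraq_alt]
      simp [hv1, hv2]
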